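-- pv_equiv track=rewrite | github.com/ckoons/BubbleSpacetimeTheory | play/toy_423_definition_check.py | kempe_chain
-- ===== SOURCE A (Python) =====
-- from collections import defaultdict, deque, Counter
--
-- def kempe_chain(adj, color, v, c1, c2, exclude=None):
--     if exclude is None:
--         exclude = set()
--     if v in exclude or color.get(v) not in (c1, c2):
--         return set()
--     visited = set()
--     queue = deque([v])
--     while queue:
--         u = queue.popleft()
--         if u in visited or u in exclude:
--             continue
--         if color.get(u) not in (c1, c2):
--             continue
--         visited.add(u)
--         for w in adj.get(u, set()):
--             if w not in visited and w not in exclude and color.get(w) in (c1, c2):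
--                 queue.append(w)
--     return visited
-- ===== SOURCE B (Python) =====
-- def kempe_chain(adj, color, v, c1, c2, exclude=None):
--     ex = exclude if exclude is not None else set()
--
--     def good(u):
--         return u not in ex and color.get(u) in (c1, c2)
--
--     if not good(v):
--         return set()
--     comp = {v}
--     while True:
--         new = comp | {w for u in comp for w in adj.get(u, set()) if good(w)}
--         if new == comp:
--             return comp
--         comp = new
-- ===== Notes on version B (the rewrite author's own statement) =====
-- stated objective: alternative
-- what changed: Replaces the worklist BFS (deque, visited set, per-neighbour enqueue filtering) by round-based fixpoint saturation: each round unions the current component with the good neighbours of ALL its members via a set comprehension, stopping when a whole round adds nothing; there is no queue/stack or visited bookkeeping at all.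
import Mathlib
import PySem

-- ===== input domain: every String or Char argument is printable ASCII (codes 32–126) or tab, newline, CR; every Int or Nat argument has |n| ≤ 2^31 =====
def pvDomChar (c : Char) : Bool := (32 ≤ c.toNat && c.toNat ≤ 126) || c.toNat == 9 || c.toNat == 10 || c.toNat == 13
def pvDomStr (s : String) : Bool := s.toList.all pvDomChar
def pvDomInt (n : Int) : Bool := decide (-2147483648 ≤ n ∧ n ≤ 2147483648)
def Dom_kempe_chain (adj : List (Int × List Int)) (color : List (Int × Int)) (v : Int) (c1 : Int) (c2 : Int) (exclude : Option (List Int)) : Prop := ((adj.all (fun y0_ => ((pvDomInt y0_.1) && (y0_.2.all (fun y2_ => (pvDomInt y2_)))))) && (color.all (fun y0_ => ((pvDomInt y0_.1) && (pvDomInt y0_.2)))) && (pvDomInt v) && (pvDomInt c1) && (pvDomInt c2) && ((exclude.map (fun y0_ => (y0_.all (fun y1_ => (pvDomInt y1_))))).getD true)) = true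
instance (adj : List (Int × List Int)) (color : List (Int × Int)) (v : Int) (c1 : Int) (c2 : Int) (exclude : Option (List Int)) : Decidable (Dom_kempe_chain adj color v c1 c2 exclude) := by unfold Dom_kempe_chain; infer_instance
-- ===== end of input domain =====

-- B replaces A's worklist BFS (deque + visited + per-neighbour enqueue filtering) by round-based
-- fixpoint saturation: each round unions the component with the good neighbours of ALL its members,
-- stopping when a round adds nothing; objective: alternative (no queue/visited bookkeeping).
-- Python returns a SET, whose iteration order is not modelled: both ports return the set's
-- elements as the sorted list (the canonical order-insensitive representation).

-- ===== PORT A =====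
-- color.get(u) in (c1, c2)
def kcColorIn (color : List (Int × Int)) (c1 c2 u : Int) : Bool :=
  match PySem.Dict.get? (PySem.Dict.mk color) u with
  | some c => c == c1 || c == c2
  | none => false

-- adj.get(u, set()) (the dict's values are lists, iterated in list order)
def kcNbr (adj : List (Int × List Int)) (u : Int) : List Int :=
  ((PySem.Dict.mk adj).get? u).getD []

-- every node carrying a colour (the finite universe the visited set grows inside)
def kcKeys (color : List (Int × Int)) : List Int := PySem.List.dedup (color.map Prod.fst)

-- termination measure: coloured nodes not yet collected
def kcMeasure (color : List (Int × Int)) (vis : List Int) : Nat :=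
  ((kcKeys color).filter (fun x => !vis.contains x)).length

-- termination helpers (cited by the loops' decreasing_by)
theorem kcFilter_len_le {α : Type} (p q : α → Bool) (l : List α)
    (h : ∀ x, p x = true → q x = true) :
    (l.filter p).length ≤ (l.filter q).length := by
  induction l with
  | nil => simp
  | cons a t ih =>
    simp only [List.filter_cons]
    cases hp : p a
    · cases hq : q a <;> simp <;> omega
    · rw [h a hp]; simpa using ih

theorem kcFilter_len_lt {α : Type} (p q : α → Bool) (l : List α)
    (h : ∀ x, p x = true → q x = true) (u : α) (hu : u ∈ l)
    (hp : p u = false) (hq : q u = true) :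
    (l.filter p).length < (l.filter q).length := by
  induction l with
  | nil => cases hu
  | cons a t ih =>
    simp only [List.filter_cons]
    rcases List.mem_cons.mp hu with rfl | hmem
    · rw [hp, hq]
      simpa using Nat.lt_succ_of_le (kcFilter_len_le p q t h)
    · have hlt := ih hmem
      cases hpa : p a
      · cases hqa : q a <;> simp <;> omega
      · rw [h a hpa]; simpa using hlt

theorem kcColorIn_mem_keys {color : List (Int × Int)} {c1 c2 u : Int}
    (h : kcColorIn color c1 c2 u = true) : u ∈ kcKeys color := by
  unfold kcColorIn at h
  cases hg : PySem.Dict.get? (PySem.Dict.mk color) u with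
  | none => rw [hg] at h; exact absurd h (by simp)
  | some c =>
    have hmem := PySem.Dict.mem_items_of_get?_eq_some (PySem.Dict.mk color) hg
    have hu : u ∈ color.map Prod.fst := by
      simpa using List.mem_map_of_mem (f := Prod.fst) hmem
    simpa [kcKeys, PySem.List.mem_dedup] using hu

theorem kcMeasure_add_lt (color : List (Int × Int)) {c1 c2 u : Int} (vis : List Int)
    (hc : kcColorIn color c1 c2 u = true) (hv : u ∉ vis) :
    kcMeasure color (PySem.Set.add vis u) < kcMeasure color vis := by
  unfold kcMeasure
  have hsub : ∀ x, (!(PySem.Set.add vis u).contains x) = true → (!vis.contains x) = true := by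
    intro x hx
    simp only [PySem.Set.contains_eq_listContains, List.contains_eq_mem, Bool.not_eq_true',
      decide_eq_false_iff_not] at hx ⊢
    exact fun hxv => hx ((PySem.Set.mem_add vis u x).2 (Or.inl hxv))
  have hpu : (!(PySem.Set.add vis u).contains u) = false := by
    simp [PySem.Set.contains_eq_listContains, List.contains_eq_mem,
      (PySem.Set.mem_add vis u u).2 (Or.inr rfl)]
  have hqu : (!vis.contains u) = true := by simp [List.contains_eq_mem, hv]
  exact kcFilter_len_lt _ _ _ hsub u (kcColorIn_mem_keys hc) hpu hqu

-- the BFS while-loop of A: queue popped at the front, neighbours filtered before enqueueing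
def kcLoopA (adj : List (Int × List Int)) (color : List (Int × Int)) (ex : List Int)
    (c1 c2 : Int) (vis queue : List Int) : List Int :=
  match queue with
  | [] => vis
  | u :: rest =>
    if h1 : u ∈ vis ∨ u ∈ ex then kcLoopA adj color ex c1 c2 vis rest
    else if h2 : ¬ (kcColorIn color c1 c2 u = true) then kcLoopA adj color ex c1 c2 vis rest
    else
      kcLoopA adj color ex c1 c2 (PySem.Set.add vis u)
        (rest ++ (kcNbr adj u).filter
          (fun w => !(PySem.Set.add vis u).contains w && !ex.contains w && kcColorIn color c1 c2 w))
termination_by (kcMeasure color vis, queue.length)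
decreasing_by
  · exact Prod.Lex.right _ (by simp)
  · exact Prod.Lex.right _ (by simp)
  · exact Prod.Lex.left _ _
      (kcMeasure_add_lt color vis (not_not.mp h2) (fun hv => h1 (Or.inl hv)))

def kempe_chain (adj : List (Int × List Int)) (color : List (Int × Int)) (v : Int) (c1 : Int) (c2 : Int) (exclude : Option (List Int)) : List Int :=
  -- if exclude is None: exclude = set()
  if v ∈ exclude.getD [] ∨ ¬ (kcColorIn color c1 c2 v = true) then ([] : List Int)
  else PySem.List.sorted (kcLoopA adj color (exclude.getD []) c1 c2 [] [v]) (fun x => x) false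

-- ===== PORT B =====
-- B's good(u): u not in ex and color.get(u) in (c1, c2)
def kcGood (color : List (Int × Int)) (ex : List Int) (c1 c2 u : Int) : Bool :=
  !ex.contains u && kcColorIn color c1 c2 u

-- {w for u in comp for w in adj.get(u, set()) if good(w)}
def kcFrontier (adj : List (Int × List Int)) (color : List (Int × Int)) (ex : List Int)
    (c1 c2 : Int) (comp : List Int) : List Int :=
  PySem.Set.ofList ((comp.flatMap (fun u => kcNbr adj u)).filter (fun w => kcGood color ex c1 c2 w))

-- comp | {…}
def kcStep (adj : List (Int × List Int)) (color : List (Int × Int)) (ex : List Int)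
    (c1 c2 : Int) (comp : List Int) : List Int :=
  PySem.Set.union comp (kcFrontier adj color ex c1 c2 comp)

-- termination helpers for B's saturation loop (cited by decreasing_by)
theorem kcFrontier_good {adj : List (Int × List Int)} {color : List (Int × Int)} {ex : List Int}
    {c1 c2 : Int} {comp : List Int} {w : Int}
    (h : w ∈ kcFrontier adj color ex c1 c2 comp) : kcGood color ex c1 c2 w = true := by
  unfold kcFrontier at h
  rw [PySem.Set.mem_ofList] at h
  exact (List.mem_filter.mp h).2

theorem kcStep_measure_lt (adj : List (Int × List Int)) (color : List (Int × Int)) (ex : List Int)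
    (c1 c2 : Int) (comp : List Int)
    (h : ¬ (PySem.Set.equal (kcStep adj color ex c1 c2 comp) comp = true)) :
    kcMeasure color (kcStep adj color ex c1 c2 comp) < kcMeasure color comp := by
  have hsub : ∀ x ∈ comp, x ∈ kcStep adj color ex c1 c2 comp := by
    intro x hx
    unfold kcStep
    exact (PySem.Set.mem_union _ _ _).2 (Or.inl hx)
  obtain ⟨x, hxnew, hxcomp⟩ : ∃ x, x ∈ kcStep adj color ex c1 c2 comp ∧ x ∉ comp := by
    by_contra hc
    push Not at hc
    apply h
    rw [PySem.Set.equal_iff]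
    exact fun y => ⟨fun hy => hc y hy, hsub y⟩
  have hxfr : x ∈ kcFrontier adj color ex c1 c2 comp := by
    unfold kcStep at hxnew
    rcases (PySem.Set.mem_union _ _ _).1 hxnew with h' | h'
    · exact absurd h' hxcomp
    · exact h'
  have hgx := kcFrontier_good hxfr
  have hcx : kcColorIn color c1 c2 x = true := by
    simp only [kcGood, Bool.and_eq_true] at hgx; exact hgx.2
  unfold kcMeasure
  refine kcFilter_len_lt _ _ _ ?_ x (kcColorIn_mem_keys hcx) ?_ ?_
  · intro y hy
    simp only [List.contains_eq_mem, Bool.not_eq_true', decide_eq_false_iff_not] at hy ⊢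
    exact fun hyc => hy (hsub y hyc)
  · simp [List.contains_eq_mem, hxnew]
  · simp [List.contains_eq_mem, hxcomp]

-- the while True saturation loop of B
def kcLoopFix (adj : List (Int × List Int)) (color : List (Int × Int)) (ex : List Int)
    (c1 c2 : Int) (comp : List Int) : List Int :=
  if h : PySem.Set.equal (kcStep adj color ex c1 c2 comp) comp = true then comp
  else kcLoopFix adj color ex c1 c2 (kcStep adj color ex c1 c2 comp)
termination_by kcMeasure color comp
decreasing_by exact kcStep_measure_lt adj color ex c1 c2 comp h

def kempe_chain_alt (adj : List (Int × List Int)) (color : List (Int × Int)) (v : Int) (c1 : Int) (c2 : Int) (exclude : Option (List Int)) : List Int :=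
  -- ex = exclude if exclude is not None else set(); if not good(v): return set()
  if ¬ (kcGood color (exclude.getD []) c1 c2 v = true) then ([] : List Int)
  else PySem.List.sorted (kcLoopFix adj color (exclude.getD []) c1 c2 [v]) (fun x => x) false

-- ===== PRECONDITION & SPEC =====
def Spec_kempe_chain (adj : List (Int × List Int)) (color : List (Int × Int)) (v : Int) (c1 : Int) (c2 : Int) (exclude : Option (List Int)) (out : List Int) : Prop := out = kempe_chain_alt adj color v c1 c2 exclude
instance (adj : List (Int × List Int)) (color : List (Int × Int)) (v : Int) (c1 : Int) (c2 : Int) (exclude : Option (List Int)) (out : List Int) : Decidable (Spec_kempe_chain adj color v c1 c2 exclude out) := by unfold Spec_kempe_chain; infer_instance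

-- ===== CLAIM (what is proved, stated in full; the proofs are below) =====
def Claim_equal_kempe_chain : Prop := ∀ (adj : List (Int × List Int)) (color : List (Int × Int)) (v : Int) (c1 : Int) (c2 : Int) (exclude : Option (List Int)), Dom_kempe_chain adj color v c1 c2 exclude → Spec_kempe_chain adj color v c1 c2 exclude (kempe_chain adj color v c1 c2 exclude)

-- ===== LEMMAS AND PROOFS =====

theorem kcGood_iff {color : List (Int × Int)} {ex : List Int} {c1 c2 u : Int} :
    kcGood color ex c1 c2 u = true ↔ u ∉ ex ∧ kcColorIn color c1 c2 u = true := by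
  simp [kcGood, List.contains_eq_mem]

-- reachability from v through good nodes only
inductive kcReach (adj : List (Int × List Int)) (color : List (Int × Int)) (ex : List Int) (c1 c2 v : Int) : Int → Prop
  | base : kcGood color ex c1 c2 v = true → kcReach adj color ex c1 c2 v v
  | step {u w : Int} : kcReach adj color ex c1 c2 v u → kcGood color ex c1 c2 w = true →
      w ∈ kcNbr adj u → kcReach adj color ex c1 c2 v w

-- ---- BFS (loop A) ----
theorem kcLoopA_mono (adj : List (Int × List Int)) (color : List (Int × Int)) (ex : List Int)
    (c1 c2 : Int) (vis queue : List Int) :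
    ∀ x ∈ vis, x ∈ kcLoopA adj color ex c1 c2 vis queue := by
  fun_induction kcLoopA adj color ex c1 c2 vis queue with
  | case1 vis => exact fun x hx => hx
  | case2 vis u rest h1 ih => exact ih
  | case3 vis u rest h1 h2 ih => exact ih
  | case4 vis u rest h1 h2 ih =>
    exact fun x hx => ih x ((PySem.Set.mem_add vis u x).2 (Or.inl hx))

theorem kcLoopA_nodup (adj : List (Int × List Int)) (color : List (Int × Int)) (ex : List Int)
    (c1 c2 : Int) (vis queue : List Int) :
    vis.Nodup → (kcLoopA adj color ex c1 c2 vis queue).Nodup := by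
  fun_induction kcLoopA adj color ex c1 c2 vis queue with
  | case1 vis => exact fun h => h
  | case2 vis u rest h1 ih => exact ih
  | case3 vis u rest h1 h2 ih => exact ih
  | case4 vis u rest h1 h2 ih => exact fun h => ih (PySem.Set.nodup_add vis u h)

theorem kcLoopA_sound (adj : List (Int × List Int)) (color : List (Int × Int)) (ex : List Int)
    (c1 c2 v : Int) (vis queue : List Int) :
    (∀ x ∈ vis, kcReach adj color ex c1 c2 v x) →
    (∀ x ∈ queue, kcReach adj color ex c1 c2 v x) →
    ∀ x ∈ kcLoopA adj color ex c1 c2 vis queue, kcReach adj color ex c1 c2 v x := by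
  fun_induction kcLoopA adj color ex c1 c2 vis queue with
  | case1 vis => exact fun hvis _ => hvis
  | case2 vis u rest h1 ih =>
    exact fun hvis hq => ih hvis (fun x hx => hq x (List.mem_cons_of_mem u hx))
  | case3 vis u rest h1 h2 ih =>
    exact fun hvis hq => ih hvis (fun x hx => hq x (List.mem_cons_of_mem u hx))
  | case4 vis u rest h1 h2 ih =>
    intro hvis hq
    have hru : kcReach adj color ex c1 c2 v u := hq u (by simp)
    refine ih ?_ ?_
    · intro x hx
      rcases (PySem.Set.mem_add vis u x).1 hx with h | rfl
      · exact hvis x h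
      · exact hru
    · intro x hx
      rcases List.mem_append.mp hx with h | h
      · exact hq x (List.mem_cons_of_mem u h)
      · obtain ⟨hxnbr, hpred⟩ := List.mem_filter.mp h
        have hgx : kcGood color ex c1 c2 x = true := by
          simp only [PySem.Set.contains_eq_listContains, Bool.and_eq_true, Bool.not_eq_true',
            List.contains_eq_mem, decide_eq_false_iff_not] at hpred
          exact kcGood_iff.2 ⟨hpred.1.2, hpred.2⟩
        exact kcReach.step hru hgx hxnbr

theorem kcLoopA_complete_mem (adj : List (Int × List Int)) (color : List (Int × Int)) (ex : List Int)
    (c1 c2 : Int) (vis queue : List Int) :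
    ∀ u ∈ queue, kcGood color ex c1 c2 u = true → u ∈ kcLoopA adj color ex c1 c2 vis queue := by
  fun_induction kcLoopA adj color ex c1 c2 vis queue with
  | case1 vis => intro u hu; cases hu
  | case2 vis u rest h1 ih =>
    intro z hz hg
    rcases List.mem_cons.mp hz with rfl | hmem
    · rcases h1 with hv | hex
      · exact kcLoopA_mono adj color ex c1 c2 vis rest z hv
      · exact absurd hex ((kcGood_iff.1 hg).1)
    · exact ih z hmem hg
  | case3 vis u rest h1 h2 ih =>
    intro z hz hg
    rcases List.mem_cons.mp hz with rfl | hmem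
    · exact absurd ((kcGood_iff.1 hg).2) h2
    · exact ih z hmem hg
  | case4 vis u rest h1 h2 ih =>
    intro z hz hg
    rcases List.mem_cons.mp hz with rfl | hmem
    · exact kcLoopA_mono adj color ex c1 c2 _ _ z ((PySem.Set.mem_add vis z z).2 (Or.inr rfl))
    · exact ih z (List.mem_append_left _ hmem) hg

theorem kcLoopA_closed (adj : List (Int × List Int)) (color : List (Int × Int)) (ex : List Int)
    (c1 c2 : Int) (vis queue : List Int) :
    (∀ x ∈ vis, ∀ w ∈ kcNbr adj x, kcGood color ex c1 c2 w = true → w ∈ vis ∨ w ∈ queue) →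
    ∀ x ∈ kcLoopA adj color ex c1 c2 vis queue, ∀ w ∈ kcNbr adj x,
      kcGood color ex c1 c2 w = true → w ∈ kcLoopA adj color ex c1 c2 vis queue := by
  fun_induction kcLoopA adj color ex c1 c2 vis queue with
  | case1 vis =>
    intro hinv x hx w hw hgw
    rcases hinv x hx w hw hgw with h | h
    · exact h
    · cases h
  | case2 vis u rest h1 ih =>
    intro hinv; apply ih; intro x hx w hw hgw
    rcases hinv x hx w hw hgw with h | h
    · exact Or.inl h
    · rcases List.mem_cons.mp h with rfl | hm
      · rcases h1 with hv | hex
        · exact Or.inl hv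
        · exact absurd hex ((kcGood_iff.1 hgw).1)
      · exact Or.inr hm
  | case3 vis u rest h1 h2 ih =>
    intro hinv; apply ih; intro x hx w hw hgw
    rcases hinv x hx w hw hgw with h | h
    · exact Or.inl h
    · rcases List.mem_cons.mp h with rfl | hm
      · exact absurd ((kcGood_iff.1 hgw).2) h2
      · exact Or.inr hm
  | case4 vis u rest h1 h2 ih =>
    intro hinv; apply ih; intro x hx w hw hgw
    rcases (PySem.Set.mem_add vis u x).1 hx with hxv | rfl
    · rcases hinv x hxv w hw hgw with h | h
      · exact Or.inl ((PySem.Set.mem_add vis u w).2 (Or.inl h))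
      · rcases List.mem_cons.mp h with rfl | hm
        · exact Or.inl ((PySem.Set.mem_add vis w w).2 (Or.inr rfl))
        · exact Or.inr (List.mem_append_left _ hm)
    · by_cases hwv : w ∈ PySem.Set.add vis x
      · exact Or.inl hwv
      · refine Or.inr (List.mem_append_right _ (List.mem_filter.2 ⟨hw, ?_⟩))
        have hg := kcGood_iff.1 hgw
        simp [PySem.Set.contains_eq_listContains, List.contains_eq_mem, hwv, hg.1, hg.2]

-- ---- saturation (loop B) ----
theorem kcFrontier_mem {adj : List (Int × List Int)} {color : List (Int × Int)} {ex : List Int}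
    {c1 c2 : Int} {comp : List Int} {w : Int} :
    w ∈ kcFrontier adj color ex c1 c2 comp ↔
      (∃ u ∈ comp, w ∈ kcNbr adj u) ∧ kcGood color ex c1 c2 w = true := by
  unfold kcFrontier
  rw [PySem.Set.mem_ofList, List.mem_filter, List.mem_flatMap]

theorem kcStep_mem {adj : List (Int × List Int)} {color : List (Int × Int)} {ex : List Int}
    {c1 c2 : Int} {comp : List Int} {x : Int} :
    x ∈ kcStep adj color ex c1 c2 comp ↔
      x ∈ comp ∨ x ∈ kcFrontier adj color ex c1 c2 comp := by
  unfold kcStep; exact PySem.Set.mem_union _ _ _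

theorem kcLoopFix_mono (adj : List (Int × List Int)) (color : List (Int × Int)) (ex : List Int)
    (c1 c2 : Int) (comp : List Int) :
    ∀ x ∈ comp, x ∈ kcLoopFix adj color ex c1 c2 comp := by
  fun_induction kcLoopFix adj color ex c1 c2 comp with
  | case1 comp h => exact fun x hx => hx
  | case2 comp h ih => exact fun x hx => ih x (kcStep_mem.2 (Or.inl hx))

theorem kcLoopFix_nodup (adj : List (Int × List Int)) (color : List (Int × Int)) (ex : List Int)
    (c1 c2 : Int) (comp : List Int) :
    comp.Nodup → (kcLoopFix adj color ex c1 c2 comp).Nodup := by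
  fun_induction kcLoopFix adj color ex c1 c2 comp with
  | case1 comp h => exact fun h => h
  | case2 comp h ih => exact fun hn => ih (PySem.Set.nodup_union comp _ hn)

theorem kcLoopFix_sound (adj : List (Int × List Int)) (color : List (Int × Int)) (ex : List Int)
    (c1 c2 v : Int) (comp : List Int) :
    (∀ x ∈ comp, kcReach adj color ex c1 c2 v x) →
    ∀ x ∈ kcLoopFix adj color ex c1 c2 comp, kcReach adj color ex c1 c2 v x := by
  fun_induction kcLoopFix adj color ex c1 c2 comp with
  | case1 comp h => exact fun hc => hc
  | case2 comp h ih =>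
    intro hc
    apply ih
    intro x hx
    rcases kcStep_mem.1 hx with hxc | hxf
    · exact hc x hxc
    · obtain ⟨⟨u, hu, hw⟩, hg⟩ := kcFrontier_mem.1 hxf
      exact kcReach.step (hc u hu) hg hw

theorem kcLoopFix_closed (adj : List (Int × List Int)) (color : List (Int × Int)) (ex : List Int)
    (c1 c2 : Int) (comp : List Int) :
    ∀ x ∈ kcLoopFix adj color ex c1 c2 comp, ∀ w ∈ kcNbr adj x,
      kcGood color ex c1 c2 w = true → w ∈ kcLoopFix adj color ex c1 c2 comp := by
  fun_induction kcLoopFix adj color ex c1 c2 comp with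
  | case1 comp h =>
    intro x hx w hw hgw
    have hwstep : w ∈ kcStep adj color ex c1 c2 comp :=
      kcStep_mem.2 (Or.inr (kcFrontier_mem.2 ⟨⟨x, hx, hw⟩, hgw⟩))
    exact ((PySem.Set.equal_iff _ _).1 h w).1 hwstep
  | case2 comp h ih => exact ih

theorem kcLoopA_iff_reach (adj : List (Int × List Int)) (color : List (Int × Int)) (ex : List Int)
    (c1 c2 v : Int) (hg : kcGood color ex c1 c2 v = true) (x : Int) :
    x ∈ kcLoopA adj color ex c1 c2 [] [v] ↔ kcReach adj color ex c1 c2 v x := by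
  constructor
  · exact fun hx => kcLoopA_sound adj color ex c1 c2 v [] [v] (by simp)
      (by intro y hy; simp at hy; subst hy; exact kcReach.base hg) x hx
  · intro hr
    induction hr with
    | base h => exact kcLoopA_complete_mem adj color ex c1 c2 [] [v] v (by simp) h
    | step hru hgw hw ih =>
      exact kcLoopA_closed adj color ex c1 c2 [] [v] (by simp) _ ih _ hw hgw

theorem kcLoopFix_iff_reach (adj : List (Int × List Int)) (color : List (Int × Int)) (ex : List Int)
    (c1 c2 v : Int) (hg : kcGood color ex c1 c2 v = true) (x : Int) :
    x ∈ kcLoopFix adj color ex c1 c2 [v] ↔ kcReach adj color ex c1 c2 v x := by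
  constructor
  · exact fun hx => kcLoopFix_sound adj color ex c1 c2 v [v]
      (by intro y hy; simp at hy; subst hy; exact kcReach.base hg) x hx
  · intro hr
    induction hr with
    | base h => exact kcLoopFix_mono adj color ex c1 c2 [v] v (by simp)
    | step hru hgw hw ih =>
      exact kcLoopFix_closed adj color ex c1 c2 [v] _ ih _ hw hgw

-- ===== VERDICT (by name: the statement is the Claim_ definition above) =====
theorem kempe_chain_spec : Claim_equal_kempe_chain := by
  intro adj color v c1 c2 exclude _
  unfold Spec_kempe_chain kempe_chain kempe_chain_alt
  by_cases hg : kcGood color (exclude.getD []) c1 c2 v = true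
  · have hnotbad : ¬ (v ∈ exclude.getD [] ∨ ¬ (kcColorIn color c1 c2 v = true)) := by
      obtain ⟨h1, h2⟩ := kcGood_iff.1 hg
      rintro (h | h)
      · exact h1 h
      · exact h h2
    rw [if_neg hnotbad, if_neg (not_not.2 hg)]
    apply PySem.List.sorted_eq_sorted_of_perm _ _ _ (fun a b h => h)
    rw [List.perm_ext_iff_of_nodup
      (kcLoopA_nodup adj color (exclude.getD []) c1 c2 [] [v] List.nodup_nil)
      (kcLoopFix_nodup adj color (exclude.getD []) c1 c2 [v] (List.nodup_singleton v))]
    intro a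
    rw [kcLoopA_iff_reach adj color (exclude.getD []) c1 c2 v hg a,
      kcLoopFix_iff_reach adj color (exclude.getD []) c1 c2 v hg a]
  · have hbad : (v ∈ exclude.getD [] ∨ ¬ (kcColorIn color c1 c2 v = true)) := by
      by_cases hvex : v ∈ exclude.getD []
      · exact Or.inl hvex
      · exact Or.inr (fun hc => hg (kcGood_iff.2 ⟨hvex, hc⟩))
    rw [if_pos hbad, if_pos hg]
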